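-- pv_equiv track=rewrite | github.com/ualiangzhang/foundry_ai_demo | scripts/build_rag_docs.py | detect_keys
-- ===== SOURCE A (Python) =====
-- from typing import List, Optional, Tuple
--
-- def detect_keys(fieldnames: List[str]) -> Tuple[Optional[str], Optional[str]]:
--     """Detect which columns in a CSV header correspond to title and description fields.
--
--     Inspects the provided list of field names from a CSV file and attempts to find:
--       - A title_key that contains "company", starts with "name", or contains "title".
--       - A desc_key that contains "description", equals "desc", or contains "idea" or "summary".
--
--     Args:
--         fieldnames (List[str]): List of column names (headers) from a CSV.
--
--     Returns:
--         Tuple[Optional[str], Optional[str]]: A tuple (title_key, desc_key). Each element is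
--             either the matched column name or None if not found.
--     """
--     title_key: Optional[str] = None
--     desc_key: Optional[str] = None
--
--     for k in fieldnames:
--         lower_k: str = k.lower()
--         # Detect title column
--         if title_key is None and ("company" in lower_k or lower_k.startswith("name") or "title" in lower_k):
--             title_key = k
--         # Detect description column
--         if desc_key is None and (
--                 "description" in lower_k or lower_k == "desc" or "idea" in lower_k or "summary" in lower_k
--         ):
--             desc_key = k
--
--     return title_key, desc_key
-- ===== SOURCE B (Python) =====
-- from typing import List, Optional, Tuple
--
-- def _find_first(fieldnames, pred):
--     return next((k for k in fieldnames if pred(k.lower())), None)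
--
-- def detect_keys(fieldnames: List[str]) -> Tuple[Optional[str], Optional[str]]:
--     title_key = _find_first(
--         fieldnames,
--         lambda s: "company" in s or s.startswith("name") or "title" in s,
--     )
--     desc_key = _find_first(
--         fieldnames,
--         lambda s: "description" in s or s == "desc" or "idea" in s or "summary" in s,
--     )
--     return title_key, desc_key
-- ===== Notes on version B (the rewrite author's own statement) =====
-- stated objective: idiomatic
-- what changed: Replaced A's single latched loop carrying two mutable slots by two independent first-match searches (next over a generator via a reused find_first helper), one per key.
import Mathlib
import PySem

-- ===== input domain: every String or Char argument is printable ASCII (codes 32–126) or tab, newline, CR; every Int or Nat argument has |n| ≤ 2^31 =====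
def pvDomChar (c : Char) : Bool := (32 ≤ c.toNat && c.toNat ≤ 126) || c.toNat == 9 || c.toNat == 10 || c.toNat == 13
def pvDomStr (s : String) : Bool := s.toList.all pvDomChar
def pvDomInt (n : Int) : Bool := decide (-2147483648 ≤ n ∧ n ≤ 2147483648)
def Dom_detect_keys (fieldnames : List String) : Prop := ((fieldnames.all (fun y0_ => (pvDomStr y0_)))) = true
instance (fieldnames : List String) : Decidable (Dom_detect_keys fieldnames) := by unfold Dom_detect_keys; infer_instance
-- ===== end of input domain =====

-- B changes the decomposition only: two independent first-match searches instead of A's single latched loop (idiomatic; no speed claim).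

-- ===== PORT A =====
-- loop body of A: one step over field name k, updating the latched (title_key, desc_key) slots
def detectKeysStep (st : Option String × Option String) (k : String) : Option String × Option String :=
  let lowerK := PySem.Str.lower k
  let t := if st.1 = none ∧ (PySem.Str.isIn "company" lowerK ∨ PySem.Str.startswith lowerK "name" ∨ PySem.Str.isIn "title" lowerK) then some k else st.1
  let d := if st.2 = none ∧ (PySem.Str.isIn "description" lowerK ∨ lowerK = "desc" ∨ PySem.Str.isIn "idea" lowerK ∨ PySem.Str.isIn "summary" lowerK) then some k else st.2
  (t, d)

def detect_keys (fieldnames : List String) : Option String × Option String :=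
  fieldnames.foldl detectKeysStep (none, none)

-- ===== PORT B =====
-- B's title predicate, applied to the lowercased name
def isTitleName (s : String) : Bool :=
  PySem.Str.isIn "company" s || PySem.Str.startswith s "name" || PySem.Str.isIn "title" s

-- B's description predicate, applied to the lowercased name
def isDescName (s : String) : Bool :=
  PySem.Str.isIn "description" s || s == "desc" || PySem.Str.isIn "idea" s || PySem.Str.isIn "summary" s

-- B's find_first helper: first field whose lowercase satisfies pred, else none
def findFirstKey (fieldnames : List String) (pred : String → Bool) : Option String :=
  fieldnames.find? (fun k => pred (PySem.Str.lower k))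

def detect_keys_alt (fieldnames : List String) : Option String × Option String :=
  (findFirstKey fieldnames isTitleName, findFirstKey fieldnames isDescName)

-- ===== PRECONDITION & SPEC =====
def Spec_detect_keys (fieldnames : List String) (out : Option String × Option String) : Prop := out = detect_keys_alt fieldnames
instance (fieldnames : List String) (out : Option String × Option String) : Decidable (Spec_detect_keys fieldnames out) := by unfold Spec_detect_keys; infer_instance

-- ===== CLAIM (what is proved, stated in full; the proofs are below) =====
def Claim_equal_detect_keys : Prop := ∀ (fieldnames : List String), Dom_detect_keys fieldnames → Spec_detect_keys fieldnames (detect_keys fieldnames)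

-- ===== LEMMAS AND PROOFS =====

-- A's step, re-expressed through B's two Boolean predicates
theorem detectKeysStep_eq (st : Option String × Option String) (k : String) :
    detectKeysStep st k =
      ((if st.1 = none ∧ isTitleName (PySem.Str.lower k) then some k else st.1),
       (if st.2 = none ∧ isDescName (PySem.Str.lower k) then some k else st.2)) := by
  unfold detectKeysStep isTitleName isDescName
  simp [beq_iff_eq, or_assoc]

-- A's latched fold from any state equals the state or-else the two independent first matches
theorem foldl_detectKeysStep (fieldnames : List String) (t d : Option String) :
    fieldnames.foldl detectKeysStep (t, d) =
      (t.or (findFirstKey fieldnames isTitleName), d.or (findFirstKey fieldnames isDescName)) := by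
  induction fieldnames generalizing t d with
  | nil => simp [findFirstKey]
  | cons k rest ih =>
    simp only [List.foldl_cons, detectKeysStep_eq]
    rw [ih]
    unfold findFirstKey
    simp only [List.find?_cons]
    by_cases h1 : isTitleName (PySem.Str.lower k) <;>
      by_cases h2 : isDescName (PySem.Str.lower k) <;>
        cases t <;> cases d <;> simp [h1, h2, Option.or]

-- ===== VERDICT (by name: the statement is the Claim_ definition above) =====
theorem detect_keys_spec : Claim_equal_detect_keys := by
  intro fieldnames _
  unfold Spec_detect_keys detect_keys detect_keys_alt
  rw [foldl_detectKeysStep]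
  simp
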